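-- pv_equiv track=rewrite | github.com/cbga/CSE163-22wi | hw1/hw1.py | mode_digit
-- ===== SOURCE A (Python) =====
-- def mode_digit(n):
--     """
--     Returns the digit that appears most frequently in the number "n".
--     """
--     if n == 0:
--         return 0
--     n = abs(n)
--     m = n
--     unique = set()
--     while n > 0:
--         num = n % 10
--         unique.add(num)
--         n = n // 10
--     dic = {}
--     for i in unique:
--         dic[i] = 0
--     while m > 0:
--         num = m % 10
--         dic[num] += 1
--         m = m // 10
--     keys = []
--     for key in dic:
--         if dic[key] == max(dic.values()):
--             keys.append(key)
--     return max(keys)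
-- ===== SOURCE B (Python) =====
-- def mode_digit(n):
--     """
--     Returns the digit that appears most frequently in the number "n".
--     """
--     s = str(abs(n))
--     return max(range(10), key=lambda d: (sum(c == str(d) for c in s), d))
-- ===== Notes on version B (the rewrite author's own statement) =====
-- stated objective: idiomatic
-- what changed: A extracts digits arithmetically into a set, initialises a dict from it, recounts into the dict and collects all tied keys before a final max; B never builds any frequency table: it renders the number as a string once and, for each candidate digit 0-9, rescans that string to count matches, taking a single keyed max with the tuple key (count, digit); A's special branch for zero disappears because the rendered string is never empty.
import Mathlib
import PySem

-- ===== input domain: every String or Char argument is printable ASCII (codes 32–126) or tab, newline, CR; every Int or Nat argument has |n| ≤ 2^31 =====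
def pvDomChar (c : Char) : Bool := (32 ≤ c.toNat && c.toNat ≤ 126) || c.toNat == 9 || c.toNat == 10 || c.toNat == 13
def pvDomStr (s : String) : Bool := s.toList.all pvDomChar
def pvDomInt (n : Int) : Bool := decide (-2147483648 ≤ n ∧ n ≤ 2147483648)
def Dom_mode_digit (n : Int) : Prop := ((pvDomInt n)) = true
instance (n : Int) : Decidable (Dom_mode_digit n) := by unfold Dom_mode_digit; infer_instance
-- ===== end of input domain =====

-- B drops A's whole table machinery (digit set, dict init, recount, collect tied keys,
-- final max): it renders the number as a string once and rescans it per candidate digit,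
-- taking one keyed max over range(10); same return value, no speed claim.

-- ===== PORT A =====
-- while n > 0: unique.add(n % 10); n = n // 10
def pvAUnique (n : Int) (u : PySem.Set Int) : PySem.Set Int :=
  if h : 0 < n then
    pvAUnique (PySem.Int.floordiv n 10) (PySem.Set.add u (PySem.Int.mod n 10))
  else u
  termination_by n.toNat
  decreasing_by
    rw [PySem.Int.floordiv_eq_ediv_of_pos (by norm_num)]
    omega

-- while m > 0: dic[num] += 1; m = m // 10
-- (dic.modify with default 0: every digit of m is already a key of dic at every call site,
--  so Python's dic[num] += 1 behaves exactly like modify there)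
def pvACount (m : Int) (dic : PySem.Dict Int Int) : PySem.Dict Int Int :=
  if h : 0 < m then
    pvACount (PySem.Int.floordiv m 10) (dic.modify (PySem.Int.mod m 10) 0 (· + 1))
  else dic
  termination_by m.toNat
  decreasing_by
    rw [PySem.Int.floordiv_eq_ediv_of_pos (by norm_num)]
    omega

def mode_digit (n : Int) : Int :=
  if n = 0 then 0
  else
    let na := |n|
    let unique := pvAUnique na PySem.Set.empty
    let dic0 : PySem.Dict Int Int := unique.foldl (fun d i => d.insert i 0) PySem.Dict.empty
    let dic := pvACount na dic0
    let keys := dic.keys.foldl (fun ks k =>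
      if dic.getD k 0 = (PySem.List.max? dic.values (fun v => v)).getD 0 then ks ++ [k] else ks)
      ([] : List Int)
    (PySem.List.max? keys (fun k => k)).getD 0

-- ===== PORT B =====
-- s = str(abs(n)); max(range(10), key=lambda d: (sum(c == str(d) for c in s), d))
-- (str → List Char via PySem.Int.toChars, exact per toList_toStr; the generator sum of
--  booleans is the sum of 0/1 over the characters of s; the tuple-keyed max is max2?)
def mode_digit_alt (n : Int) : Int :=
  let s := PySem.Int.toChars |n|
  (PySem.List.max2? (PySem.List.pyRange 0 10 1)
    (fun d => (s.map (fun c => if [c] = PySem.Int.toChars d then (1 : Int) else 0)).sum)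
    (fun d => d)).getD 0

-- ===== PRECONDITION & SPEC =====
def Spec_mode_digit (n : Int) (out : Int) : Prop := out = mode_digit_alt n
instance (n : Int) (out : Int) : Decidable (Spec_mode_digit n out) := by unfold Spec_mode_digit; infer_instance

-- ===== CLAIM (what is proved, stated in full; the proofs are below) =====
def Claim_equal_mode_digit : Prop := ∀ (n : Int), Dom_mode_digit n → Spec_mode_digit n (mode_digit n)

-- ===== LEMMAS AND PROOFS =====

-- the digits of m (least significant first), as integers
def pvDigs (m : Int) : List Int := (Nat.digits 10 m.toNat).map (Nat.cast : Nat → Int)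

-- "(count y, y) ≤ (count r, r) lexicographically in ds"
def pvLex (ds : List Int) (y r : Int) : Prop :=
  (ds.count y : Int) < ds.count r ∨ ((ds.count y : Int) = ds.count r ∧ y ≤ r)

lemma pvDigs_cons {m : Int} (h : 0 < m) :
    pvDigs m = PySem.Int.mod m 10 :: pvDigs (PySem.Int.floordiv m 10) := by
  unfold pvDigs
  rw [Nat.digits_def' (by norm_num : 1 < 10) (by omega : 0 < m.toNat), List.map_cons]
  have h1 : ((m.toNat % 10 : Nat) : Int) = PySem.Int.mod m 10 := by
    rw [PySem.Int.mod_eq_emod_of_pos (by norm_num : (0:Int) < 10)]; omega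
  have h2 : m.toNat / 10 = (PySem.Int.floordiv m 10).toNat := by
    rw [PySem.Int.floordiv_eq_ediv_of_pos (by norm_num : (0:Int) < 10)]; omega
  rw [h1, h2]

lemma pvDigs_nil {m : Int} (h : ¬ 0 < m) : pvDigs m = [] := by
  unfold pvDigs
  have hz : m.toNat = 0 := by omega
  rw [hz]
  simp

lemma pvDigs_mem_bound {m : Int} : ∀ d ∈ pvDigs m, 0 ≤ d ∧ d < 10 := by
  intro d hd
  unfold pvDigs at hd
  rcases List.mem_map.mp hd with ⟨t, ht, rfl⟩
  have := Nat.digits_lt_base (b := 10) (by norm_num) ht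
  omega

lemma pvDigs_ne_nil {m : Int} (h : 0 < m) : pvDigs m ≠ [] := by
  rw [pvDigs_cons h]; simp

lemma pvAUnique_eq : ∀ (k : Nat) (m : Int), m.toNat ≤ k → ∀ u,
    pvAUnique m u = (pvDigs m).foldl PySem.Set.add u := by
  intro k
  induction k with
  | zero =>
    intro m hm u
    have h : ¬ 0 < m := by omega
    rw [pvAUnique, dif_neg h, pvDigs_nil h]
    rfl
  | succ k ih =>
    intro m hm u
    by_cases h : 0 < m
    · rw [pvAUnique, dif_pos h, pvDigs_cons h, List.foldl_cons]
      exact ih _ (by rw [PySem.Int.floordiv_eq_ediv_of_pos (by norm_num)]; omega) _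
    · rw [pvAUnique, dif_neg h, pvDigs_nil h]
      rfl

lemma pvACount_eq : ∀ (k : Nat) (m : Int), m.toNat ≤ k → ∀ d,
    pvACount m d = (pvDigs m).foldl (fun d x => d.modify x 0 (· + 1)) d := by
  intro k
  induction k with
  | zero =>
    intro m hm d
    have h : ¬ 0 < m := by omega
    rw [pvACount, dif_neg h, pvDigs_nil h]
    rfl
  | succ k ih =>
    intro m hm d
    by_cases h : 0 < m
    · rw [pvACount, dif_pos h, pvDigs_cons h, List.foldl_cons]
      exact ih _ (by rw [PySem.Int.floordiv_eq_ediv_of_pos (by norm_num)]; omega) _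
    · rw [pvACount, dif_neg h, pvDigs_nil h]
      rfl

-- max2? on a two-or-more-element list: fold the first two into their lexicographic max
lemma max2?_cons_cons (k1 k2 : Int → Int) (a b : Int) (t : List Int) :
    PySem.List.max2? (a :: b :: t) k1 k2 =
      PySem.List.max2?
        ((if k1 a < k1 b ∨ (¬ k1 b < k1 a ∧ k2 a < k2 b) then b else a) :: t) k1 k2 := by
  unfold PySem.List.max2?
  simp only [List.foldl_cons]
  congr 1
  show (if (decide (k1 a < k1 b) || !decide (k1 b < k1 a) && decide (k2 a < k2 b)) = true
      then some b else some a) =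
    some (if k1 a < k1 b ∨ (¬ k1 b < k1 a ∧ k2 a < k2 b) then b else a)
  rw [apply_ite some]
  exact if_congr (by simp) rfl rfl

lemma max2?_spec_len (k1 k2 : Int → Int) :
    ∀ (N : Nat) (xs : List Int), xs.length ≤ N → ∀ m, PySem.List.max2? xs k1 k2 = some m →
      m ∈ xs ∧ ∀ y ∈ xs, k1 y < k1 m ∨ (k1 y = k1 m ∧ k2 y ≤ k2 m) := by
  intro N
  induction N with
  | zero =>
    intro xs hl m h
    have hx : xs = [] := List.eq_nil_of_length_eq_zero (by omega)
    subst hx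
    simp [PySem.List.max2?] at h
  | succ N ih =>
    intro xs hl m h
    cases xs with
    | nil => simp [PySem.List.max2?] at h
    | cons a t =>
      cases t with
      | nil =>
        have ha : PySem.List.max2? [a] k1 k2 = some a := rfl
        rw [ha] at h
        injection h with h
        subst h
        refine ⟨by simp, ?_⟩
        intro y hy
        rcases List.mem_singleton.mp hy with rfl
        exact Or.inr ⟨rfl, le_rfl⟩
      | cons b t =>
        rw [max2?_cons_cons] at h
        by_cases hcond : k1 a < k1 b ∨ (¬ k1 b < k1 a ∧ k2 a < k2 b)
        · rw [if_pos hcond] at h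
          obtain ⟨hmem, hall⟩ := ih (b :: t) (by simp at hl ⊢; omega) m h
          have hbm : k1 b < k1 m ∨ (k1 b = k1 m ∧ k2 b ≤ k2 m) := hall b (by simp)
          refine ⟨List.mem_cons_of_mem _ hmem, ?_⟩
          intro y hy
          rcases List.mem_cons.mp hy with rfl | hy
          · omega
          · exact hall y hy
        · rw [if_neg hcond] at h
          obtain ⟨hmem, hall⟩ := ih (a :: t) (by simp at hl ⊢; omega) m h
          have ham : k1 a < k1 m ∨ (k1 a = k1 m ∧ k2 a ≤ k2 m) := hall a (by simp)
          refine ⟨?_, ?_⟩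
          · rcases List.mem_cons.mp hmem with rfl | hmt
            · simp
            · exact List.mem_cons_of_mem _ (List.mem_cons_of_mem _ hmt)
          · intro y hy
            rcases List.mem_cons.mp hy with rfl | hy
            · exact ham
            · rcases List.mem_cons.mp hy with rfl | hy
              · omega
              · exact hall y (List.mem_cons_of_mem _ hy)

lemma max2?_isSome_len (k1 k2 : Int → Int) :
    ∀ (N : Nat) (xs : List Int), xs.length ≤ N → xs ≠ [] →
      ∃ m, PySem.List.max2? xs k1 k2 = some m := by
  intro N
  induction N with
  | zero =>
    intro xs hl hne
    cases xs with
    | nil => exact absurd rfl hne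
    | cons a t => simp at hl
  | succ N ih =>
    intro xs hl hne
    cases xs with
    | nil => exact absurd rfl hne
    | cons a t =>
      cases t with
      | nil => exact ⟨a, rfl⟩
      | cons b t =>
        rw [max2?_cons_cons k1 k2]
        exact ih _ (by simp at hl ⊢; omega) (by simp)

-- dict built by inserting 0 at each key: getD is 0 everywhere
lemma getD_foldl_insert0 : ∀ (ks : List Int) (d : PySem.Dict Int Int),
    (∀ x, d.getD x 0 = 0) → ∀ x, (ks.foldl (fun d i => d.insert i 0) d).getD x 0 = 0 := by
  intro ks
  induction ks with
  | nil => intro d hd x; exact hd x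
  | cons k ks ih =>
    intro d hd x
    rw [List.foldl_cons]
    refine ih _ ?_ x
    intro y
    rw [PySem.Dict.getD_insert]
    by_cases h : y = k <;> simp [h, hd y]

lemma mem_keys_foldl_insert0 : ∀ (ks : List Int) (d : PySem.Dict Int Int) (x : Int),
    x ∈ (ks.foldl (fun d i => d.insert i 0) d).keys ↔ x ∈ ks ∨ x ∈ d.keys := by
  intro ks
  induction ks with
  | nil => intro d x; simp
  | cons k ks ih =>
    intro d x
    rw [List.foldl_cons, ih, PySem.Dict.mem_keys_insert]
    constructor
    · rintro (h | h)
      · exact Or.inl (List.mem_cons_of_mem _ h)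
      · rcases h with rfl | h
        · exact Or.inl (by simp)
        · exact Or.inr h
    · rintro (h | h)
      · rcases List.mem_cons.mp h with rfl | h
        · exact Or.inr (Or.inl rfl)
        · exact Or.inl h
      · exact Or.inr (Or.inr h)

lemma nodup_keys_foldl_insert0 : ∀ (ks : List Int) (d : PySem.Dict Int Int),
    d.keys.Nodup → (ks.foldl (fun d i => d.insert i 0) d).keys.Nodup := by
  intro ks
  induction ks with
  | nil => intro d hd; exact hd
  | cons k ks ih =>
    intro d hd
    rw [List.foldl_cons]
    exact ih _ (PySem.Dict.nodup_keys_insert d k 0 hd)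

-- keys after the counting fold
lemma mem_keys_foldl_modify : ∀ (ds : List Int) (d : PySem.Dict Int Int) (x : Int),
    x ∈ (ds.foldl (fun d x => d.modify x 0 (· + 1)) d).keys ↔ x ∈ ds ∨ x ∈ d.keys := by
  intro ds
  induction ds with
  | nil => intro d x; simp
  | cons k ks ih =>
    intro d x
    rw [List.foldl_cons, ih]
    rw [show (d.modify k 0 (· + 1)).keys = (d.insert k ((d.getD k 0) + 1)).keys from
      PySem.Dict.keys_modify d k 0 (· + 1)]
    rw [PySem.Dict.mem_keys_insert]
    constructor
    · rintro (h | h)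
      · exact Or.inl (List.mem_cons_of_mem _ h)
      · rcases h with rfl | h
        · exact Or.inl (by simp)
        · exact Or.inr h
    · rintro (h | h)
      · rcases List.mem_cons.mp h with rfl | h
        · exact Or.inr (Or.inl rfl)
        · exact Or.inl h
      · exact Or.inr (Or.inr h)

lemma nodup_keys_foldl_modify : ∀ (ds : List Int) (d : PySem.Dict Int Int),
    d.keys.Nodup → (ds.foldl (fun d x => d.modify x 0 (· + 1)) d).keys.Nodup := by
  intro ds
  induction ds with
  | nil => intro d hd; exact hd
  | cons k ks ih =>
    intro d hd
    rw [List.foldl_cons]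
    refine ih _ ?_
    rw [show (d.modify k 0 (· + 1)).keys = (d.insert k ((d.getD k 0) + 1)).keys from
      PySem.Dict.keys_modify d k 0 (· + 1)]
    exact PySem.Dict.nodup_keys_insert d k _ hd

-- values ↔ getD over keys (for a dict with Nodup keys)
lemma mem_values_iff {d : PySem.Dict Int Int} (hnd : d.keys.Nodup) (v : Int) :
    v ∈ d.values ↔ ∃ k ∈ d.keys, d.getD k 0 = v := by
  constructor
  · intro hv
    have hv' : v ∈ d.items.map (fun p => p.2) := hv
    rcases List.mem_map.mp hv' with ⟨⟨k, w⟩, hp, hw⟩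
    cases hw
    refine ⟨k, ?_, PySem.Dict.getD_of_mem_items d hp hnd 0⟩
    show k ∈ d.items.map (fun p => p.1)
    exact List.mem_map.mpr ⟨(k, w), hp, rfl⟩
  · rintro ⟨k, hk, rfl⟩
    have hk' : k ∈ d.items.map (fun p => p.1) := hk
    rcases List.mem_map.mp hk' with ⟨⟨k', w⟩, hp, he⟩
    cases he
    rw [PySem.Dict.getD_of_mem_items d hp hnd 0]
    show w ∈ d.items.map (fun p => p.2)
    exact List.mem_map.mpr ⟨(k', w), hp, rfl⟩

-- A's result for n ≠ 0: it is a digit of |n| and is lexicographically maximal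
-- for the key (count among the digits, digit) over all of 0..9
lemma mode_digit_char {n : Int} (h0 : n ≠ 0) :
    mode_digit n ∈ pvDigs |n| ∧ ∀ y, 0 ≤ y → y < 10 → pvLex (pvDigs |n|) y (mode_digit n) := by
  have hm : 0 < |n| := abs_pos.mpr h0
  have hbody : mode_digit n =
      (PySem.List.max?
        ((pvACount |n|
            ((pvAUnique |n| PySem.Set.empty).foldl (fun d i => d.insert i 0)
              PySem.Dict.empty)).keys.foldl
          (fun ks k =>
            if (pvACount |n|
                ((pvAUnique |n| PySem.Set.empty).foldl (fun d i => d.insert i 0)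
                  PySem.Dict.empty)).getD k 0 =
              (PySem.List.max?
                (pvACount |n|
                  ((pvAUnique |n| PySem.Set.empty).foldl (fun d i => d.insert i 0)
                    PySem.Dict.empty)).values (fun v => v)).getD 0
            then ks ++ [k] else ks) [])
        (fun k => k)).getD 0 := by
    rw [mode_digit, if_neg h0]
  rw [hbody]
  set m : Int := |n| with hmdef
  rw [pvAUnique_eq m.toNat m le_rfl, pvACount_eq m.toNat m le_rfl]
  set ds : List Int := pvDigs m with hds
  set unique : PySem.Set Int := ds.foldl PySem.Set.add PySem.Set.empty with huniq
  set dic0 : PySem.Dict Int Int := unique.foldl (fun d i => d.insert i 0) PySem.Dict.empty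
    with hdic0
  set dic : PySem.Dict Int Int := ds.foldl (fun d x => d.modify x 0 (· + 1)) dic0 with hdic
  have hnd0 : dic0.keys.Nodup := by
    rw [hdic0]
    exact nodup_keys_foldl_insert0 unique PySem.Dict.empty PySem.Dict.nodup_keys_empty
  have hnd : dic.keys.Nodup := by
    rw [hdic]
    exact nodup_keys_foldl_modify ds dic0 hnd0
  have hkeys0 : ∀ x, x ∈ dic0.keys ↔ x ∈ ds := by
    intro x
    rw [hdic0, mem_keys_foldl_insert0]
    constructor
    · rintro (h | h)
      · rw [huniq] at h
        rcases (PySem.Set.mem_foldl_add ds (fun b => b) PySem.Set.empty x).mp h with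
          h' | ⟨b, hb, rfl⟩
        · simp [PySem.Set.empty] at h'
        · exact hb
      · rw [PySem.Dict.keys_empty] at h
        simp at h
    · intro h
      exact Or.inl (by
        rw [huniq]
        exact (PySem.Set.mem_foldl_add ds (fun b => b) PySem.Set.empty x).mpr
          (Or.inr ⟨x, h, rfl⟩))
  have hkeys : ∀ x, x ∈ dic.keys ↔ x ∈ ds := by
    intro x
    rw [hdic, mem_keys_foldl_modify]
    constructor
    · rintro (h | h)
      · exact h
      · exact (hkeys0 x).mp h
    · intro h
      exact Or.inl h
  have hget : ∀ x, dic.getD x 0 = (ds.count x : Int) := by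
    intro x
    rw [hdic, PySem.Dict.getD_foldl_modify_add_one]
    rw [hdic0, getD_foldl_insert0 unique PySem.Dict.empty
      (fun y => PySem.Dict.getD_empty y 0) x]
    ring
  have hne : ds ≠ [] := pvDigs_ne_nil hm
  have hvalsne : dic.values ≠ [] := by
    intro hval
    obtain ⟨x, hx⟩ := List.exists_mem_of_ne_nil _ hne
    have hmem : dic.getD x 0 ∈ dic.values :=
      (mem_values_iff hnd _).mpr ⟨x, (hkeys x).mpr hx, rfl⟩
    rw [hval] at hmem
    simp at hmem
  obtain ⟨mv, hmv⟩ : ∃ mv, PySem.List.max? dic.values (fun v => v) = some mv := by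
    rcases h : PySem.List.max? dic.values (fun v => v) with _ | mv
    · exact absurd ((PySem.List.max?_eq_none_iff _ _).mp h) hvalsne
    · exact ⟨mv, rfl⟩
  have hmv_max : ∀ v ∈ dic.values, v ≤ mv := fun v hv => PySem.List.max?_isMax hmv v hv
  rcases (mem_values_iff hnd mv).mp (PySem.List.max?_mem hmv) with ⟨k0, hk0, hk0v⟩
  have hk0ds : k0 ∈ ds := (hkeys k0).mp hk0
  have hmv_cnt : (ds.count k0 : Int) = mv := by rw [← hget k0, hk0v]
  have hcnt_le : ∀ x ∈ ds, (ds.count x : Int) ≤ mv := by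
    intro x hx
    have hmem : dic.getD x 0 ∈ dic.values :=
      (mem_values_iff hnd _).mpr ⟨x, (hkeys x).mpr hx, rfl⟩
    have hle := hmv_max _ hmem
    rwa [hget x] at hle
  have hmv_pos : 1 ≤ mv := by
    have hp : 0 < ds.count k0 := List.count_pos_iff.mpr hk0ds
    omega
  have hmv' : (PySem.List.max? dic.values (fun v => v)).getD 0 = mv := by
    rw [hmv, Option.getD_some]
  have hkeq : dic.keys.foldl
      (fun ks k =>
        if dic.getD k 0 = (PySem.List.max? dic.values (fun v => v)).getD 0 then ks ++ [k]
        else ks) [] =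
      [] ++ dic.keys.filter
        (fun k => decide (dic.getD k 0 = (PySem.List.max? dic.values (fun v => v)).getD 0)) :=
    PySem.List.foldl_append_ite_eq_filter _ _ _
  rw [hkeq, List.nil_append]
  set keys : List Int := dic.keys.filter
    (fun k => decide (dic.getD k 0 = (PySem.List.max? dic.values (fun v => v)).getD 0))
    with hkeysl
  have hkeys_mem : ∀ x, x ∈ keys ↔ x ∈ ds ∧ (ds.count x : Int) = mv := by
    intro x
    rw [hkeysl, List.mem_filter]
    simp only [decide_eq_true_eq]
    rw [hkeys x, hget x, hmv']
  have hkeysne : keys ≠ [] := by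
    intro hk
    have hmem : k0 ∈ keys := (hkeys_mem k0).mpr ⟨hk0ds, hmv_cnt⟩
    rw [hk] at hmem
    simp at hmem
  obtain ⟨r, hr⟩ : ∃ r, PySem.List.max? keys (fun k => k) = some r := by
    rcases h : PySem.List.max? keys (fun k => k) with _ | r
    · exact absurd ((PySem.List.max?_eq_none_iff _ _).mp h) hkeysne
    · exact ⟨r, rfl⟩
  rw [hr]
  simp only [Option.getD_some]
  have hr_max : ∀ y ∈ keys, y ≤ r := fun y hy => PySem.List.max?_isMax hr y hy
  rcases (hkeys_mem r).mp (PySem.List.max?_mem hr) with ⟨hr_ds, hr_cnt⟩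
  refine ⟨hr_ds, ?_⟩
  intro y hy0 hy10
  unfold pvLex
  by_cases hyds : y ∈ ds
  · have h1 : (ds.count y : Int) ≤ mv := hcnt_le y hyds
    by_cases h2 : (ds.count y : Int) = mv
    · have hyk : y ∈ keys := (hkeys_mem y).mpr ⟨hyds, h2⟩
      exact Or.inr ⟨by omega, hr_max y hyk⟩
    · exact Or.inl (by omega)
  · have hz : ds.count y = 0 := List.count_eq_zero.mpr hyds
    exact Or.inl (by omega)

-- ===== B-side lemmas: the string of |n| counts its digits =====

-- str(n) for a one-digit n is one character
lemma toChars_single {d : Int} (h0 : 0 ≤ d) (h10 : d < 10) :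
    PySem.Int.toChars d = [Nat.digitChar d.toNat] := by
  interval_cases d <;> decide

-- toDigitsCore accumulates by appending
lemma toDigitsCore_acc : ∀ (f n : Nat) (ds : List Char),
    Nat.toDigitsCore 10 f n ds = Nat.toDigitsCore 10 f n [] ++ ds := by
  intro f
  induction f with
  | zero => intro n ds; simp [Nat.toDigitsCore]
  | succ f ih =>
    intro n ds
    simp only [Nat.toDigitsCore]
    by_cases h : n / 10 = 0
    · simp [h]
    · simp only [h, if_false]
      rw [ih (n / 10) [Nat.digitChar (n % 10)],
        ih (n / 10) (Nat.digitChar (n % 10) :: ds)]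
      simp

-- with enough fuel, toDigitsCore writes the base-10 digits, most significant first
lemma toDigitsCore_eq_digits : ∀ (f n : Nat), 0 < n → n < f →
    Nat.toDigitsCore 10 f n [] = ((Nat.digits 10 n).map Nat.digitChar).reverse := by
  intro f
  induction f with
  | zero => intro n h0 hf; omega
  | succ f ih =>
    intro n h0 hf
    simp only [Nat.toDigitsCore]
    rw [Nat.digits_def' (by norm_num : 1 < 10) h0, List.map_cons, List.reverse_cons]
    by_cases h : n / 10 = 0
    · rw [if_pos h, h]
      simp
    · rw [if_neg h, toDigitsCore_acc,
        ih (n / 10) (Nat.pos_of_ne_zero h)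
          (by have := Nat.div_lt_self h0 (by norm_num : 1 < 10); omega)]

lemma toChars_eq_digits {m : Int} (h : 0 < m) :
    PySem.Int.toChars m = ((Nat.digits 10 m.toNat).map Nat.digitChar).reverse := by
  unfold PySem.Int.toChars
  rw [if_neg (by omega), Nat.toDigits]
  exact toDigitsCore_eq_digits (m.toNat + 1) m.toNat (by omega) (by omega)

-- digitChar is injective on single digits
lemma pvDigitChar_inj : ∀ x : Nat, x < 10 → ∀ y : Nat, y < 10 →
    Nat.digitChar x = Nat.digitChar y → x = y := by decide

-- the 0/1 sum over the string of |n| is the digit count, for every candidate 0 ≤ d < 10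
lemma sum_chars_eq_count {m d : Int} (hm : 0 < m) (h0 : 0 ≤ d) (h10 : d < 10) :
    ((PySem.Int.toChars m).map
      (fun c => if [c] = PySem.Int.toChars d then (1 : Int) else 0)).sum =
      ((pvDigs m).count d : Int) := by
  rw [toChars_single h0 h10, toChars_eq_digits hm]
  have h1 : ∀ (cs : List Char),
      (cs.map (fun c => if [c] = [Nat.digitChar d.toNat] then (1 : Int) else 0)).sum =
        (cs.count (Nat.digitChar d.toNat) : Int) := by
    intro cs
    induction cs with
    | nil => simp
    | cons c cs ih =>
      rw [List.map_cons, List.sum_cons, ih, List.count_cons]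
      by_cases h : c = Nat.digitChar d.toNat
      · simp [h]
        omega
      · simp [h]
  rw [h1, List.count_reverse]
  congr 1
  -- count of the digit char in the mapped list = count of the digit in the digit list
  have h2 : ((Nat.digits 10 m.toNat).map Nat.digitChar).count (Nat.digitChar d.toNat) =
      (Nat.digits 10 m.toNat).count d.toNat := by
    rw [List.count_eq_countP, List.count_eq_countP, List.countP_map]
    refine List.countP_congr ?_
    intro x hx
    have hx10 := Nat.digits_lt_base (by norm_num : 1 < 10) hx
    simp only [Function.comp_apply, beq_iff_eq]
    constructor
    · intro he
      exact pvDigitChar_inj x hx10 d.toNat (by omega) he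
    · intro he
      rw [he]
  rw [h2]
  unfold pvDigs
  rw [List.count_eq_countP, List.count_eq_countP, List.countP_map]
  refine (List.countP_congr ?_).symm
  intro x hx
  simp only [Function.comp_apply, beq_iff_eq]
  omega

-- B's result for n ≠ 0: in 0..9 and lexicographically maximal for the same key
lemma mode_digit_alt_char {n : Int} (h0 : n ≠ 0) :
    (0 ≤ mode_digit_alt n ∧ mode_digit_alt n < 10) ∧
      ∀ y, 0 ≤ y → y < 10 → pvLex (pvDigs |n|) y (mode_digit_alt n) := by
  have hm : 0 < |n| := abs_pos.mpr h0
  rw [mode_digit_alt]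
  set m : Int := |n| with hmdef
  set key1 : Int → Int := fun d =>
    ((PySem.Int.toChars m).map
      (fun c => if [c] = PySem.Int.toChars d then (1 : Int) else 0)).sum with hkey1
  obtain ⟨r, hr⟩ := max2?_isSome_len key1 (fun d => d)
    10 (PySem.List.pyRange 0 10 1) (by decide) (by decide)
  rw [hr]
  simp only [Option.getD_some]
  obtain ⟨hr_mem, hr_max⟩ := max2?_spec_len key1 (fun d => d)
    10 (PySem.List.pyRange 0 10 1) (by decide) r hr
  have hr_rng : 0 ≤ r ∧ r < 10 := by
    have hb := PySem.List.mem_pyRange_one.mp hr_mem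
    omega
  refine ⟨hr_rng, ?_⟩
  intro y hy0 hy10
  have hy_mem : y ∈ PySem.List.pyRange 0 10 1 := PySem.List.mem_pyRange_one.mpr ⟨hy0, hy10⟩
  have hkey := hr_max y hy_mem
  unfold pvLex
  simp only [hkey1] at hkey
  rw [sum_chars_eq_count hm hy0 hy10, sum_chars_eq_count hm hr_rng.1 hr_rng.2] at hkey
  exact hkey

-- ===== VERDICT (by name: the statement is the Claim_ definition above) =====
theorem mode_digit_spec : Claim_equal_mode_digit := by
  unfold Claim_equal_mode_digit
  intro n _
  unfold Spec_mode_digit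
  by_cases h0 : n = 0
  · subst h0
    have hA : mode_digit 0 = 0 := by rw [mode_digit]; norm_num
    have hB : mode_digit_alt 0 = 0 := by decide
    rw [hA, hB]
  · obtain ⟨hA_mem, hA_lex⟩ := mode_digit_char h0
    obtain ⟨⟨hB0, hB10⟩, hB_lex⟩ := mode_digit_alt_char h0
    have hA_rng := pvDigs_mem_bound _ hA_mem
    have h1 := hA_lex (mode_digit_alt n) hB0 hB10
    have h2 := hB_lex (mode_digit n) hA_rng.1 hA_rng.2
    unfold pvLex at h1 h2
    omega
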